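-- pv_equiv track=rewrite | github.com/nounder/zift | scripts/gen_framework.py | _remove_toplevel_enum
-- ===== SOURCE A (Python) =====
-- def _remove_toplevel_enum(content, name):
--     """Remove a top-level (non-indented) enum/struct declaration."""
--     lines = content.split("\n")
--     out, skip = [], False
--     for line in lines:
--         if line.startswith(f"pub const {name} = ") and not line.startswith("    "):
--             skip = True
--             continue
--         if skip:
--             if line.strip() == "};":
--                 skip = False
--                 continue
--             continue
--         out.append(line)
--     return "\n".join(out)
-- ===== SOURCE B (Python) =====
-- def _remove_toplevel_enum(content, name):
--     """Remove a top-level enum/struct declaration, by segmenting at '};' lines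
--     and truncating each segment at its first declaration-start line."""
--     prefix = f"pub const {name} = "
--     segments, cur = [], []
--     for line in content.split("\n"):
--         cur.append(line)
--         if line.strip() == "};":
--             segments.append(cur)
--             cur = []
--     segments.append(cur)
--     out = []
--     for seg in segments:
--         hit = next((k for k, l in enumerate(seg) if l.startswith(prefix)), None)
--         out.extend(seg if hit is None else seg[:hit])
--     return "\n".join(out)
-- ===== Notes on version B (the rewrite author's own statement) =====
-- stated objective: alternative
-- what changed: Replaces A's single-pass skip-flag state machine with a staged decomposition: first split the line list into '};'-terminated segments, then truncate each segment at its first 'pub const {name} = ' line (dropping the rest of the segment including its closing '};') and join the segments back.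
import Mathlib
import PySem

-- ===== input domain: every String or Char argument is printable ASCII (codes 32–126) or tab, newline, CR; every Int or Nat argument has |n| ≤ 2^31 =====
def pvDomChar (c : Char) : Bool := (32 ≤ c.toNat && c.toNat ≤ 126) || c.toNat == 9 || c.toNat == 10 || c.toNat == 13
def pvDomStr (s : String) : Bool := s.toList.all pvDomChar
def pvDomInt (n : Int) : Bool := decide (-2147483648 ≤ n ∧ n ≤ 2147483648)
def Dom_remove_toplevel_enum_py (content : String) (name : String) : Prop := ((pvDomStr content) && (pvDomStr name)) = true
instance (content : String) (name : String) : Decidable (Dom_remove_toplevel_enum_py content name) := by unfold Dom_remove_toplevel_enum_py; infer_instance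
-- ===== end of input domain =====

-- B replaces A's skip-flag state machine by a staged decomposition: split the
-- line list into "};"-terminated segments, then truncate each segment at its
-- first declaration-start line (objective: alternative, same cost).

-- ===== PORT A =====
-- the f-string prefix "pub const {name} = " as a char list
def pvPrefix (name : String) : List Char :=
  "pub const ".toList ++ name.toList ++ " = ".toList

-- one iteration of A's for-loop body over the state (out, skip)
def pvAStep (pre : List Char) (st : List (List Char) × Bool) (line : List Char) :
    List (List Char) × Bool :=
  if PySem.Chars.startswith line pre && !PySem.Chars.startswith line "    ".toList then
    (st.1, true)
  else if st.2 then
    if PySem.Chars.strip line = "};".toList then (st.1, false) else (st.1, true)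
  else
    (st.1 ++ [line], false)

def remove_toplevel_enum_py (content : String) (name : String) : String :=
  let lines := PySem.Chars.splitOn content.toList ['\n']
  let res := lines.foldl (pvAStep (pvPrefix name)) ([], false)
  String.mk (PySem.Chars.join ['\n'] res.1)

-- ===== PORT B =====
-- B's first loop: accumulate lines into the current segment, closing it at "};"
def pvSegStep (st : List (List (List Char)) × List (List Char)) (line : List Char) :
    List (List (List Char)) × List (List Char) :=
  let cur := st.2 ++ [line]
  if PySem.Chars.strip line = "};".toList then (st.1 ++ [cur], []) else (st.1, cur)

def pvSegs (ls : List (List Char)) : List (List (List Char)) :=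
  let st := ls.foldl pvSegStep ([], [])
  st.1 ++ [st.2]

-- B's per-segment processing: first index of a start line (next(...)), then slice
def pvProcSeg (pre : List Char) (seg : List (List Char)) : List (List Char) :=
  match seg.findIdx? (fun l => PySem.Chars.startswith l pre) with
  | none => seg
  | some k => seg.take k

def remove_toplevel_enum_py_alt (content : String) (name : String) : String :=
  let segs := pvSegs (PySem.Chars.splitOn content.toList ['\n'])
  let out := segs.foldl (fun out seg => out ++ pvProcSeg (pvPrefix name) seg) []
  String.mk (PySem.Chars.join ['\n'] out)

-- ===== PRECONDITION & SPEC =====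
def Spec_remove_toplevel_enum_py (content : String) (name : String) (out : String) : Prop := out = remove_toplevel_enum_py_alt content name
instance (content : String) (name : String) (out : String) : Decidable (Spec_remove_toplevel_enum_py content name out) := by unfold Spec_remove_toplevel_enum_py; infer_instance

-- ===== CLAIM (what is proved, stated in full; the proofs are below) =====
def Claim_equal_remove_toplevel_enum_py : Prop := ∀ (content : String) (name : String), Dom_remove_toplevel_enum_py content name → Spec_remove_toplevel_enum_py content name (remove_toplevel_enum_py content name)

-- ===== LEMMAS AND PROOFS =====

-- proof-side intermediate form: A's state machine as a block-jumping recursion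
def pvSkipBlock (ls : List (List Char)) : List (List Char) :=
  (ls.dropWhile (fun l => PySem.Chars.strip l ≠ "};".toList)).drop 1

def pvBGo (pre : List Char) : List (List Char) → List (List Char)
  | [] => []
  | l :: ls =>
    if PySem.Chars.startswith l pre then pvBGo pre (pvSkipBlock ls)
    else l :: pvBGo pre ls
termination_by ls => ls.length
decreasing_by
  · simp only [pvSkipBlock, List.length_drop, List.length_cons]
    have h1 := List.length_dropWhile_le (fun l => PySem.Chars.strip l ≠ "};".toList) ls
    omega
  · simp

-- map over the first element only
def pvMapFirst (f : List (List Char) → List (List Char)) :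
    List (List (List Char)) → List (List (List Char))
  | [] => []
  | s :: ss => f s :: ss

-- the prefix always starts with 'p'
theorem pvPrefix_head (name : String) : ∃ t, pvPrefix name = 'p' :: t :=
  ⟨"ub const ".toList ++ name.toList ++ " = ".toList, rfl⟩

-- a line matching the prefix starts with the non-space letter 'p'
theorem pv_start_head {name : String} {l : List Char}
    (h : PySem.Chars.startswith l (pvPrefix name) = true) : ∃ t, l = 'p' :: t := by
  obtain ⟨t, ht⟩ := pvPrefix_head name
  rw [PySem.Chars.startswith_iff, ht] at h
  obtain ⟨u, hu⟩ := h
  exact ⟨t ++ u, hu.symm⟩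

-- hence it does not start with four spaces (A's second test is redundant)
theorem pv_start_not_spaces {name : String} {l : List Char}
    (h : PySem.Chars.startswith l (pvPrefix name) = true) :
    PySem.Chars.startswith l "    ".toList = false := by
  obtain ⟨t, ht⟩ := pv_start_head h
  subst ht
  simp [PySem.Chars.startswith, List.isPrefixOf]

-- stripping a line that starts with 'p' yields a list starting with 'p'
theorem pv_strip_p_head (t : List Char) :
    ∃ u, PySem.Chars.strip ('p' :: t) = 'p' :: u := by
  have hl : PySem.Chars.lstrip ('p' :: t) = 'p' :: t := by
    simp [PySem.Chars.lstrip, show PySem.Chars.isspace 'p' = false from rfl]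
  simp only [PySem.Chars.strip, hl, PySem.Chars.rstrip]
  rw [show ('p' :: t).reverse = t.reverse ++ ['p'] by simp]
  rw [List.dropWhile_append]
  split
  · exact ⟨[], by decide⟩
  · exact ⟨(List.dropWhile PySem.Chars.isspace t.reverse).reverse, by simp⟩

-- a start line never strips to the closing brace line
theorem pv_start_not_close {name : String} {l : List Char}
    (h : PySem.Chars.startswith l (pvPrefix name) = true) :
    ¬ PySem.Chars.strip l = "};".toList := by
  obtain ⟨t, ht⟩ := pv_start_head h
  subst ht
  obtain ⟨u, hu⟩ := pv_strip_p_head t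
  rw [hu]
  intro hcon
  have : 'p' = '}' := by
    have := congrArg (List.head? ·) hcon
    simpa using this
  exact absurd this (by decide)

-- A's fold only ever appends to the accumulator
theorem pv_foldl_acc (pre : List Char) (ls : List (List Char)) :
    ∀ (acc : List (List Char)) (skip : Bool),
      (ls.foldl (pvAStep pre) (acc, skip)).1
        = acc ++ (ls.foldl (pvAStep pre) ([], skip)).1 := by
  induction ls with
  | nil => intro acc skip; simp
  | cons l ls ih =>
    intro acc skip
    simp only [List.foldl_cons, pvAStep]
    split_ifs
    · exact ih acc true
    · exact ih acc false
    · exact ih acc true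
    · rw [ih (acc ++ [l]) false, ih ([] ++ [l]) false]; simp

-- A in skip mode over ls produces what it produces in normal mode after the block
theorem pv_skip_true (name : String) (ls : List (List Char)) :
    (ls.foldl (pvAStep (pvPrefix name)) ([], true)).1
      = ((pvSkipBlock ls).foldl (pvAStep (pvPrefix name)) ([], false)).1 := by
  induction ls with
  | nil => rfl
  | cons l ls ih =>
    by_cases hc : PySem.Chars.strip l = "};".toList
    · have hstart : PySem.Chars.startswith l (pvPrefix name) = false := by
        cases hs : PySem.Chars.startswith l (pvPrefix name)
        · rfl
        · exact absurd hc (pv_start_not_close hs)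
      simp [List.foldl_cons, pvAStep, hstart, hc, pvSkipBlock]
    · have hc2 : ¬ PySem.Chars.strip l = ['}', ';'] := hc
      have hsb : pvSkipBlock (l :: ls) = pvSkipBlock ls := by
        simp [pvSkipBlock, hc2]
      rw [hsb, ← ih]
      simp only [List.foldl_cons, pvAStep]
      split_ifs <;> rfl

-- A in normal mode computes exactly the block-jumping recursion
theorem pv_false_eq_bgo (name : String) :
    ∀ (n : Nat) (ls : List (List Char)), ls.length ≤ n →
      (ls.foldl (pvAStep (pvPrefix name)) ([], false)).1 = pvBGo (pvPrefix name) ls := by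
  intro n
  induction n with
  | zero =>
    intro ls h
    have : ls = [] := List.eq_nil_of_length_eq_zero (Nat.le_zero.mp h)
    subst this; simp [pvBGo]
  | succ n ih =>
    intro ls h
    match ls with
    | [] => simp [pvBGo]
    | l :: ls' =>
      by_cases hstart : PySem.Chars.startswith l (pvPrefix name) = true
      · have hsp := pv_start_not_spaces hstart
        have hlen : (pvSkipBlock ls').length ≤ n := by
          have h1 := List.length_dropWhile_le (fun x => PySem.Chars.strip x ≠ "};".toList) ls'
          simp only [pvSkipBlock, List.length_drop]
          simp only [List.length_cons] at h
          omega
        rw [pvBGo]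
        simp only [List.foldl_cons, pvAStep, hstart, hsp]
        simp only [Bool.not_false, Bool.and_true, if_pos]
        rw [pv_skip_true, ih _ hlen]
      · have hstart' : PySem.Chars.startswith l (pvPrefix name) = false :=
          Bool.eq_false_iff.mpr (fun hx => hstart hx)
        have hlen : ls'.length ≤ n := by simp only [List.length_cons] at h; omega
        rw [pvBGo]
        simp only [List.foldl_cons, pvAStep, hstart', Bool.false_and, Bool.false_eq_true,
          if_false, List.nil_append]
        rw [pv_foldl_acc, ih _ hlen]
        simp

-- characterisation of the segmentation fold with a general state
theorem pv_segs_fold (ls : List (List Char)) :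
    ∀ (segs : List (List (List Char))) (cur : List (List Char)),
      (ls.foldl pvSegStep (segs, cur)).1 ++ [(ls.foldl pvSegStep (segs, cur)).2]
        = segs ++ pvMapFirst (cur ++ ·) (pvSegs ls) := by
  induction ls with
  | nil => intro segs cur; simp [pvSegs, pvMapFirst]
  | cons l ls ih =>
    intro segs cur
    by_cases hc : PySem.Chars.strip l = "};".toList
    · have hc2 : PySem.Chars.strip l = ['}', ';'] := hc
      have hstep : ∀ (st : List (List (List Char)) × List (List Char)),
          pvSegStep st l = (st.1 ++ [st.2 ++ [l]], []) := by
        intro st; simp [pvSegStep, hc2]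
      have hstep0 : pvSegStep ([], []) l = ([[l]], []) := by
        simp [pvSegStep, hc2]
      have hsegs : pvSegs (l :: ls) = [[l]] ++ pvMapFirst (([] : List (List Char)) ++ ·) (pvSegs ls) := by
        simp only [pvSegs, List.foldl_cons, hstep0]
        exact ih [[l]] []
      rw [hsegs]
      simp only [List.foldl_cons, hstep (segs, cur)]
      rw [ih (segs ++ [cur ++ [l]]) []]
      cases pvSegs ls <;> simp [pvMapFirst]
    · have hc2 : ¬ PySem.Chars.strip l = ['}', ';'] := hc
      have hstep : ∀ (st : List (List (List Char)) × List (List Char)),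
          pvSegStep st l = (st.1, st.2 ++ [l]) := by
        intro st; simp [pvSegStep, hc2]
      have hstep0 : pvSegStep ([], []) l = ([], [l]) := by
        simp [pvSegStep, hc2]
      have hsegs : pvSegs (l :: ls) = pvMapFirst (([l] : List (List Char)) ++ ·) (pvSegs ls) := by
        simp only [pvSegs, List.foldl_cons, hstep0]
        have := ih [] [l]
        simpa using this
      rw [hsegs]
      simp only [List.foldl_cons, hstep (segs, cur)]
      rw [ih segs (cur ++ [l])]
      cases pvSegs ls <;> simp [pvMapFirst]

theorem pv_segs_ne_nil (ls : List (List Char)) : pvSegs ls ≠ [] := by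
  simp [pvSegs]

theorem pv_segs_nil : pvSegs [] = [[]] := rfl

theorem pv_segs_cons_close {l : List Char} (ls : List (List Char))
    (hc : PySem.Chars.strip l = "};".toList) :
    pvSegs (l :: ls) = [l] :: pvSegs ls := by
  have hc2 : PySem.Chars.strip l = ['}', ';'] := hc
  have hstep0 : pvSegStep ([], []) l = ([[l]], []) := by
    simp [pvSegStep, hc2]
  have h1 : pvSegs (l :: ls)
      = (ls.foldl pvSegStep ([[l]], [])).1 ++ [(ls.foldl pvSegStep ([[l]], [])).2] := by
    simp only [pvSegs, List.foldl_cons, hstep0]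
  rw [h1, pv_segs_fold ls [[l]] []]
  cases h : pvSegs ls with
  | nil => exact absurd h (pv_segs_ne_nil ls)
  | cons s ss => simp [pvMapFirst]

theorem pv_segs_cons_open {l : List Char} (ls : List (List Char))
    (hc : ¬ PySem.Chars.strip l = "};".toList) :
    pvSegs (l :: ls) = pvMapFirst (l :: ·) (pvSegs ls) := by
  have hc2 : ¬ PySem.Chars.strip l = ['}', ';'] := hc
  have hstep0 : pvSegStep ([], []) l = ([], [l]) := by
    simp [pvSegStep, hc2]
  have h1 : pvSegs (l :: ls)
      = (ls.foldl pvSegStep ([], [l])).1 ++ [(ls.foldl pvSegStep ([], [l])).2] := by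
    simp only [pvSegs, List.foldl_cons, hstep0]
  rw [h1, pv_segs_fold ls [] [l]]
  cases pvSegs ls <;> simp [pvMapFirst]

-- B's second loop is a flatMap of per-segment processing
theorem pv_fold_flat (pre : List Char) (segs : List (List (List Char))) :
    segs.foldl (fun out seg => out ++ pvProcSeg pre seg) []
      = (segs.map (pvProcSeg pre)).flatten := by
  have := PySem.List.foldl_append_eq_flatMap (g := pvProcSeg pre) (l := segs)
    (acc := ([] : List (List Char)))
  simp only [List.nil_append] at this
  rw [this, List.flatMap_def]

-- flattened processing is unchanged by skipping past the first close line
theorem pv_skip_segs (pre : List Char) (ls : List (List Char)) :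
    ((pvSegs (pvSkipBlock ls)).map (pvProcSeg pre)).flatten
      = (((pvSegs ls).tail).map (pvProcSeg pre)).flatten := by
  induction ls with
  | nil => simp [pvSkipBlock, pv_segs_nil, pvProcSeg]
  | cons l ls ih =>
    by_cases hc : PySem.Chars.strip l = "};".toList
    · have : pvSkipBlock (l :: ls) = ls := by simp [pvSkipBlock, hc]
      rw [this, pv_segs_cons_close ls hc]
      -- goal: flatten (map (pvSegs ls)) = flatten (map (tail ([l] :: pvSegs ls)))
      simp
    · have hc2 : ¬ PySem.Chars.strip l = ['}', ';'] := hc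
      have : pvSkipBlock (l :: ls) = pvSkipBlock ls := by
        simp only [pvSkipBlock, List.dropWhile_cons]
        simp [hc2]
      rw [this, ih, pv_segs_cons_open ls hc]
      cases pvSegs ls <;> simp [pvMapFirst]

-- a start line heads its (truncated-to-empty) segment
theorem pv_proc_start {name : String} {l : List Char} (s : List (List Char))
    (h : PySem.Chars.startswith l (pvPrefix name) = true) :
    pvProcSeg (pvPrefix name) (l :: s) = [] := by
  simp [pvProcSeg, List.findIdx?_cons, h]

theorem pv_proc_no_start {name : String} {l : List Char} (s : List (List Char))
    (h : PySem.Chars.startswith l (pvPrefix name) = false) :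
    pvProcSeg (pvPrefix name) (l :: s) = l :: pvProcSeg (pvPrefix name) s := by
  simp only [pvProcSeg, List.findIdx?_cons, h, cond_false]
  cases hf : s.findIdx? (fun x => PySem.Chars.startswith x (pvPrefix name)) with
  | none => simp
  | some k => simp [List.take_succ_cons]

-- the block-jumping recursion equals B's segmented computation
theorem pv_bgo_eq_segs (name : String) :
    ∀ (n : Nat) (ls : List (List Char)), ls.length ≤ n →
      pvBGo (pvPrefix name) ls = ((pvSegs ls).map (pvProcSeg (pvPrefix name))).flatten := by
  intro n
  induction n with
  | zero =>
    intro ls h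
    have : ls = [] := List.eq_nil_of_length_eq_zero (Nat.le_zero.mp h)
    subst this; simp [pvBGo, pv_segs_nil, pvProcSeg]
  | succ n ih =>
    intro ls h
    match ls with
    | [] => simp [pvBGo, pv_segs_nil, pvProcSeg]
    | l :: ls' =>
      by_cases hstart : PySem.Chars.startswith l (pvPrefix name) = true
      · have hc := pv_start_not_close hstart
        have hlen : (pvSkipBlock ls').length ≤ n := by
          have h1 := List.length_dropWhile_le (fun x => PySem.Chars.strip x ≠ "};".toList) ls'
          simp only [pvSkipBlock, List.length_drop]
          simp only [List.length_cons] at h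
          omega
        rw [pvBGo]
        simp only [hstart, if_pos]
        rw [ih _ hlen, pv_skip_segs, pv_segs_cons_open ls' hc]
        cases hs : pvSegs ls' with
        | nil => exact absurd hs (pv_segs_ne_nil ls')
        | cons s ss =>
          simp only [pvMapFirst, List.map_cons, List.flatten_cons,
            pv_proc_start s hstart, List.nil_append, List.tail_cons]
      · have hstart' : PySem.Chars.startswith l (pvPrefix name) = false :=
          Bool.eq_false_iff.mpr (fun hx => hstart hx)
        have hlen : ls'.length ≤ n := by simp only [List.length_cons] at h; omega
        rw [pvBGo]
        simp only [hstart', Bool.false_eq_true, if_false]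
        rw [ih _ hlen]
        by_cases hc : PySem.Chars.strip l = "};".toList
        · rw [pv_segs_cons_close ls' hc]
          simp only [List.map_cons, List.flatten_cons,
            pv_proc_no_start [] hstart']
          simp [pvProcSeg]
        · rw [pv_segs_cons_open ls' hc]
          cases hs : pvSegs ls' with
          | nil => exact absurd hs (pv_segs_ne_nil ls')
          | cons s ss =>
            simp only [pvMapFirst, List.map_cons, List.flatten_cons,
              pv_proc_no_start s hstart', List.cons_append]

-- ===== VERDICT (by name: the statement is the Claim_ definition above) =====
theorem remove_toplevel_enum_py_spec : Claim_equal_remove_toplevel_enum_py := by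
  intro content name _
  unfold Spec_remove_toplevel_enum_py remove_toplevel_enum_py remove_toplevel_enum_py_alt
  apply congrArg (fun x => String.mk (PySem.Chars.join ['\n'] x))
  rw [pv_false_eq_bgo name (PySem.Chars.splitOn content.toList ['\n']).length _ le_rfl,
    pv_fold_flat,
    pv_bgo_eq_segs name (PySem.Chars.splitOn content.toList ['\n']).length _ le_rfl]
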